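-- pv_equiv track=rewrite | github.com/oljakon/experiment-planning | lab3/main.py | count_eq_rows
-- ===== SOURCE A (Python) =====
-- def count_eq_rows(plTable, i, N):
--     count = 0
--
--     for j in range(N):
--         eq = True
--         for k in range(len(plTable) - 1):
--             eq = eq and (plTable[k][j] == plTable[k][i])
--         if eq:
--             count += 1
--
--     return count
-- ===== SOURCE B (Python) =====
-- def count_eq_rows(plTable, i, N):
--     rows = plTable[:-1]
--     counts = {}
--     for j in range(N):
--         sig = tuple(row[j] for row in rows)
--         counts[sig] = counts.get(sig, 0) + 1
--     if not counts:
--         return 0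
--     return counts.get(tuple(row[i] for row in rows), 0)
-- ===== Notes on version B (the rewrite author's own statement) =====
-- stated objective: alternative
-- what changed: Instead of comparing each column j directly to column i with a nested row loop, B builds a dict counting how many columns share each column signature (the tuple of entries in rows 0..len-2) and looks up column i's signature once.
-- outside the precondition, e.g. on count_eq_rows([[1, 2], [5], [9, 9]], 0, 2): A returns 1, B raises IndexError
import Mathlib
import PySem

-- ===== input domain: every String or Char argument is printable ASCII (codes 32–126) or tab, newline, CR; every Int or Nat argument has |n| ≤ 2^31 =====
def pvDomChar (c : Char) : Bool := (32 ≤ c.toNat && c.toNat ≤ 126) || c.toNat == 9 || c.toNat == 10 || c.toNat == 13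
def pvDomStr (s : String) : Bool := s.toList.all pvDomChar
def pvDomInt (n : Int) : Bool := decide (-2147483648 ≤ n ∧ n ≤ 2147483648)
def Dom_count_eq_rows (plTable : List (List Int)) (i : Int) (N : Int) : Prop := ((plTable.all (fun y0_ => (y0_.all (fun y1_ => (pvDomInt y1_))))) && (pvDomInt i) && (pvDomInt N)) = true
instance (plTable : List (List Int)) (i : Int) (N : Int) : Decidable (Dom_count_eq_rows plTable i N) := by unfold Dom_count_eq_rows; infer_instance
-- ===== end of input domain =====

-- B counts columns grouped by their row-signature in a dict and looks column i's signature up once,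
-- instead of A's direct per-column comparison against column i; same cost, different decomposition.

-- ===== PORT A =====
def count_eq_rows (plTable : List (List Int)) (i : Int) (N : Int) : Int :=
  (PySem.List.pyRange 0 N 1).foldl
    (fun count j =>
      let eq := (List.range (plTable.length - 1)).foldl
        (fun eq k =>
          eq && (PySem.List.pyGetD (plTable.getD k []) j 0 == PySem.List.pyGetD (plTable.getD k []) i 0))
        true
      if eq then count + 1 else count)
    0

-- ===== PORT B =====
def count_eq_rows_alt (plTable : List (List Int)) (i : Int) (N : Int) : Int :=
  let rows := plTable.dropLast
  let counts := (PySem.List.pyRange 0 N 1).foldl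
    (fun d j =>
      let sig := rows.map (fun row => PySem.List.pyGetD row j 0)
      d.insert sig (d.getD sig 0 + 1))
    PySem.Dict.empty
  if counts.size = 0 then 0
  else counts.getD (rows.map (fun row => PySem.List.pyGetD row i 0)) 0

-- ===== PRECONDITION & SPEC =====
-- Pre_ excludes inputs where column indexing raises IndexError in Python: when N > 0 and the table has
-- at least two rows, every row but the last must admit index i and all indices 0..N-1.  This also excludes
-- some ragged inputs on which A still returns only because its 'eq and …' short-circuit skips the
-- out-of-range access, while B's signature building would raise IndexError there (see cites).
def Pre_count_eq_rows (plTable : List (List Int)) (i : Int) (N : Int) : Prop :=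
  (decide (N ≤ 0) || decide (plTable.length ≤ 1) ||
    plTable.dropLast.all (fun row =>
      decide (-(row.length : Int) ≤ i) && decide (i < (row.length : Int)) &&
      decide (N ≤ (row.length : Int)))) = true
instance (plTable : List (List Int)) (i : Int) (N : Int) : Decidable (Pre_count_eq_rows plTable i N) := by
  unfold Pre_count_eq_rows; infer_instance

def pvWitness_count_eq_rows : List (List Int) × Int × Int := ([[1, 2], [3, 3], [0, 0]], 0, 2)

def Spec_count_eq_rows (plTable : List (List Int)) (i : Int) (N : Int) (out : Int) : Prop := out = count_eq_rows_alt plTable i N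
instance (plTable : List (List Int)) (i : Int) (N : Int) (out : Int) : Decidable (Spec_count_eq_rows plTable i N out) := by unfold Spec_count_eq_rows; infer_instance

-- ===== CLAIM (what is proved, stated in full; the proofs are below) =====
def Claim_equal_count_eq_rows : Prop := ∀ (plTable : List (List Int)) (i : Int) (N : Int), Dom_count_eq_rows plTable i N → Pre_count_eq_rows plTable i N → Spec_count_eq_rows plTable i N (count_eq_rows plTable i N)

-- ===== LEMMAS AND PROOFS =====

-- A running 'and' over a list is List.all.
theorem foldl_and_eq_all (q : Nat → Bool) (l : List Nat) (b : Bool) :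
    l.foldl (fun e k => e && q k) b = (b && l.all q) := by
  induction l generalizing b with
  | nil => simp
  | cons x xs ih => simp [List.foldl_cons, ih, Bool.and_assoc]

-- A's inner loop over row indices equals the comparison of the two column signatures.
theorem inner_eq (t : List (List Int)) (i j : Int) :
    ((List.range (t.length - 1)).foldl
        (fun e k =>
          e && (PySem.List.pyGetD (t.getD k []) j 0 == PySem.List.pyGetD (t.getD k []) i 0)) true)
      = (t.dropLast.map (fun row => PySem.List.pyGetD row j 0)
          == t.dropLast.map (fun row => PySem.List.pyGetD row i 0)) := by
  rw [foldl_and_eq_all, Bool.true_and, Bool.eq_iff_iff]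
  simp only [List.all_eq_true, List.mem_range, beq_iff_eq, List.map_inj_left]
  constructor
  · intro h row hrow
    obtain ⟨k, hk, rfl⟩ := List.mem_iff_getElem.mp hrow
    have hk' : k < t.length - 1 := by
      simpa [List.length_dropLast] using hk
    have hkt : k < t.length := by omega
    have := h k hk'
    simpa [List.getElem_dropLast, List.getD, List.getElem?_eq_getElem hkt] using this
  · intro h k hk
    have hk' : k < t.dropLast.length := by simp [List.length_dropLast]; omega
    have hkt : k < t.length := by omega
    have := h (t.dropLast[k]) (List.getElem_mem hk')
    simpa [List.getElem_dropLast, List.getD, List.getElem?_eq_getElem hkt] using this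

-- The two ports agree on every input (both read cells with the same total 'getD 0' primitive).
theorem ports_eq (t : List (List Int)) (i N : Int) :
    count_eq_rows t i N = count_eq_rows_alt t i N := by
  unfold count_eq_rows count_eq_rows_alt
  simp only []
  -- rewrite A into a countP over the range
  have hA : (PySem.List.pyRange 0 N 1).foldl
      (fun count j =>
        let eq := (List.range (t.length - 1)).foldl
          (fun eq k =>
            eq && (PySem.List.pyGetD (t.getD k []) j 0 == PySem.List.pyGetD (t.getD k []) i 0)) true
        if eq then count + 1 else count) 0
      = ((PySem.List.pyRange 0 N 1).countP
          (fun j => t.dropLast.map (fun row => PySem.List.pyGetD row j 0)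
              == t.dropLast.map (fun row => PySem.List.pyGetD row i 0)) : Int) := by
    simp only [inner_eq]
    rw [PySem.List.foldl_if_add_one]
    simp
  rw [hA]
  -- rewrite B's dict into a counter over the mapped signatures
  have hB : (PySem.List.pyRange 0 N 1).foldl
      (fun d j =>
        let sig := t.dropLast.map (fun row => PySem.List.pyGetD row j 0)
        d.insert sig (d.getD sig 0 + 1))
      PySem.Dict.empty
      = PySem.Dict.counter
          ((PySem.List.pyRange 0 N 1).map
            (fun j => t.dropLast.map (fun row => PySem.List.pyGetD row j 0))) := by
    rw [← PySem.Dict.foldl_insert_getD_add_one_eq_counter, List.foldl_map]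
  rw [hB]
  by_cases hN : N ≤ 0
  · rw [PySem.List.pyRange_one_eq_nil hN]
    simp [PySem.Dict.counter]
  · rw [not_le] at hN
    have hcons := PySem.List.pyRange_one_cons (a := 0) (b := N) hN
    set f : Int → List Int := fun j => t.dropLast.map (fun row => PySem.List.pyGetD row j 0) with hf
    have hne : ((PySem.List.pyRange 0 N 1).map f) ≠ [] := by
      rw [hcons]; simp
    have hsize : (PySem.Dict.counter ((PySem.List.pyRange 0 N 1).map f)).size ≠ 0 := by
      intro h0
      have : (PySem.Dict.counter ((PySem.List.pyRange 0 N 1).map f)).items.length = 0 := h0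
      rw [PySem.Dict.items_counter] at this
      have hset : PySem.Set.ofList ((PySem.List.pyRange 0 N 1).map f) = [] := by
        simpa using List.length_eq_zero_iff.mp (by simpa using this)
      cases h : (PySem.List.pyRange 0 N 1).map f with
      | nil => exact hne h
      | cons x xs =>
        have : x ∈ PySem.Set.ofList ((PySem.List.pyRange 0 N 1).map f) := by
          rw [PySem.Set.mem_ofList, h]; exact List.mem_cons_self
        rw [hset] at this; exact (List.not_mem_nil) this
    rw [if_neg hsize, PySem.Dict.getD_counter]
    rw [List.count_eq_countP, List.countP_map]
    congr 1

-- ===== VERDICT (by name: the statement is the Claim_ definition above) =====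
theorem count_eq_rows_spec : Claim_equal_count_eq_rows := by
  intro t i N _hdom _hpre
  unfold Spec_count_eq_rows
  exact ports_eq t i N
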